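-- pv_equiv track=rewrite | github.com/dmelcer9/automaton-learning | automaton_learning/deepsynth_wrapper.py | reduce_stutter
-- ===== SOURCE A (Python) =====
-- from typing import NamedTuple, Dict, Any, List, Iterable
--
-- def reduce_stutter(trace: List[int]):
--     """Allow only a single stutter"""
--     new_trace = []
--     last_stutter = None
--     stutter_count = 0
--
--     for elem in trace:
--         if elem == last_stutter:
--             stutter_count += 1
--             if stutter_count <= 2:
--                 new_trace.append(elem)
--         else:
--             last_stutter = elem
--             stutter_count = 1
--             new_trace.append(elem)
--
--     return new_trace
-- ===== SOURCE B (Python) =====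
-- def reduce_stutter(trace):
--     """Allow only a single stutter: keep an element unless it equals both of its two predecessors."""
--     return [x for x, p1, p2 in zip(trace, [None] + trace, [None, None] + trace)
--             if not (x == p1 == p2)]
-- ===== Notes on version B (the rewrite author's own statement) =====
-- stated objective: idiomatic
-- what changed: B replaces the stateful last_stutter/stutter_count loop by a single stateless comprehension over the trace zipped with its two shifted copies, keeping an element iff it does not equal both of its two predecessors.
import Mathlib
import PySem

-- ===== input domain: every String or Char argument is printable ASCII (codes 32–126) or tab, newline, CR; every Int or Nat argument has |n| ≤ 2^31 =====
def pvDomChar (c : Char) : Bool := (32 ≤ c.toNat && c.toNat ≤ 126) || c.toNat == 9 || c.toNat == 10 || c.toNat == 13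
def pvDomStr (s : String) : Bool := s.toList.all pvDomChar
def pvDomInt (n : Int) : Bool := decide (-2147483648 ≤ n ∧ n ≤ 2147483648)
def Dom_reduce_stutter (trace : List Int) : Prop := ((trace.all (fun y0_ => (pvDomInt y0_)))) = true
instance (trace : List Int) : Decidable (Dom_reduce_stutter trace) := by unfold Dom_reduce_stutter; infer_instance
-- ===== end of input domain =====

-- ===== PORT A =====
-- B changes: the stateful last_stutter/stutter_count loop becomes a stateless pass over the
-- trace zipped with its two shifted copies (objective: more idiomatic); same return value.
def stepA (s : List Int × Option Int × Int) (elem : Int) : List Int × Option Int × Int :=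
  match s with
  | (new_trace, last_stutter, stutter_count) =>
    if last_stutter = some elem then
      let stutter_count := stutter_count + 1
      (if stutter_count ≤ 2 then new_trace ++ [elem] else new_trace,
       last_stutter, stutter_count)
    else
      (new_trace ++ [elem], some elem, 1)

def reduce_stutter (trace : List Int) : List Int :=
  (trace.foldl stepA ([], none, 0)).1

-- ===== PORT B =====
-- zip the trace with its two shifted copies (`none` plays Python's None, which compares
-- unequal to every int) and keep x unless x == p1 == p2.
def reduce_stutter_alt (trace : List Int) : List Int :=
  (trace.zip ((none :: trace.map some).zip (none :: none :: trace.map some))).filterMap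
    (fun p => if some p.1 = p.2.1 ∧ p.2.1 = p.2.2 then none else some p.1)

-- ===== PRECONDITION & SPEC =====
def Spec_reduce_stutter (trace : List Int) (out : List Int) : Prop := out = reduce_stutter_alt trace
instance (trace : List Int) (out : List Int) : Decidable (Spec_reduce_stutter trace out) := by unfold Spec_reduce_stutter; infer_instance

-- ===== CLAIM (what is proved, stated in full; the proofs are below) =====
def Claim_equal_reduce_stutter : Prop := ∀ (trace : List Int), Dom_reduce_stutter trace → Spec_reduce_stutter trace (reduce_stutter trace)

-- ===== LEMMAS AND PROOFS =====

-- run-truncation spec both ports are reduced to: p1/p2 are the two previous elements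
def runAux (p1 p2 : Option Int) : List Int → List Int
  | [] => []
  | x :: xs =>
      if some x = p1 ∧ p1 = p2 then runAux (some x) p1 xs
      else x :: runAux (some x) p1 xs

theorem alt_eq_runAux (xs : List Int) : ∀ (p1 p2 : Option Int),
    ((xs.zip ((p1 :: xs.map some).zip (p2 :: p1 :: xs.map some))).filterMap
      (fun p => if some p.1 = p.2.1 ∧ p.2.1 = p.2.2 then none else some p.1))
    = runAux p1 p2 xs := by
  induction xs with
  | nil => intro p1 p2; rfl
  | cons x xs ih =>
      intro p1 p2
      simp only [List.map_cons, List.zip_cons_cons, List.filterMap_cons, runAux]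
      by_cases h : some x = p1 ∧ p1 = p2
      · rw [if_pos h, if_pos h]; exact ih (some x) p1
      · rw [if_neg h, if_neg h]; exact congrArg (List.cons x) (ih (some x) p1)

theorem foldA_eq_runAux (xs : List Int) :
    ∀ (acc : List Int) (last : Option Int) (cnt : Int) (p1 p2 : Option Int),
    p1 = last → (2 ≤ cnt ↔ (p2 = p1 ∧ p1 ≠ none)) → (p1 ≠ none → 1 ≤ cnt) →
    (xs.foldl stepA (acc, last, cnt)).1 = acc ++ runAux p1 p2 xs := by
  induction xs with
  | nil => intro acc last cnt p1 p2 h1 h2 h3; simp [runAux]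
  | cons x xs ih =>
      intro acc last cnt p1 p2 h1 h2 h3
      subst h1
      rw [List.foldl_cons]
      by_cases hl : p1 = some x
      · subst hl
        have hcnt1 : 1 ≤ cnt := h3 (by simp)
        by_cases hp : p2 = some x
        · -- third (or later) in a row: dropped by both
          subst hp
          have h2c : 2 ≤ cnt := h2.mpr ⟨rfl, by simp⟩
          rw [runAux, if_pos ⟨rfl, rfl⟩]
          simp only [stepA]
          rw [if_pos trivial, if_neg (show ¬ cnt + 1 ≤ 2 by omega)]
          exact ih acc (some x) (cnt + 1) (some x) (some x) rfl
            ⟨fun _ => ⟨rfl, by simp⟩, fun _ => by omega⟩ (fun _ => by omega)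
        · -- exactly the second occurrence: kept by both
          have h2c : ¬ 2 ≤ cnt := fun h => hp (h2.mp h).1
          rw [runAux, if_neg (by rintro ⟨-, h⟩; exact hp h.symm)]
          simp only [stepA]
          rw [if_pos trivial, if_pos (show cnt + 1 ≤ 2 by omega)]
          rw [ih (acc ++ [x]) (some x) (cnt + 1) (some x) (some x) rfl
            ⟨fun _ => ⟨rfl, by simp⟩, fun _ => by omega⟩ (fun _ => by omega)]
          simp
      · -- a new run starts: kept by both
        rw [runAux, if_neg (by rintro ⟨h, -⟩; exact hl h.symm)]
        simp only [stepA, if_neg hl]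
        rw [ih (acc ++ [x]) (some x) 1 (some x) p1 rfl
          ⟨fun h => absurd h (by omega), fun h => absurd h.1 hl⟩
          (fun _ => le_refl 1)]
        simp

theorem reduce_stutter_eq (trace : List Int) :
    reduce_stutter trace = reduce_stutter_alt trace := by
  unfold reduce_stutter reduce_stutter_alt
  rw [alt_eq_runAux,
      foldA_eq_runAux trace [] none 0 none none rfl (by simp) (by simp)]
  simp

-- ===== VERDICT (by name: the statement is the Claim_ definition above) =====
theorem reduce_stutter_spec : Claim_equal_reduce_stutter := by
  intro trace _
  exact reduce_stutter_eq trace
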